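-- pv_equiv track=rewrite | github.com/pm-usp/X-Processes | Gateway OR/log.py | remove_consecutive_repetitions
-- ===== SOURCE A (Python) =====
-- def remove_consecutive_repetitions(trace):
--     trace_length = len(trace)
--     if trace_length < 3:
--         return trace
--     result = [trace[0], trace[1]]
--     for i in range(2, trace_length):
--         if not (trace[i] == trace[i - 1] == trace[i - 2]):
--             result.append(trace[i])
--     return result
-- ===== SOURCE B (Python) =====
-- def remove_consecutive_repetitions(trace):
--     if len(trace) < 3:
--         return trace
--     n = len(trace)
--     result = []
--     i = 0
--     while i < n:
--         j = i
--         while j < n and trace[j] == trace[i]: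
--             j += 1
--         result.extend([trace[i]] * min(j - i, 2))
--         i = j
--     return result
-- ===== Notes on version B (the rewrite author's own statement) =====
-- stated objective: alternative
-- what changed: B scans the list run by run (an inner loop finds each maximal run of equal elements) and emits min(run_length, 2) copies per run, instead of A's per-element three-way look-back comparison.
import Mathlib
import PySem

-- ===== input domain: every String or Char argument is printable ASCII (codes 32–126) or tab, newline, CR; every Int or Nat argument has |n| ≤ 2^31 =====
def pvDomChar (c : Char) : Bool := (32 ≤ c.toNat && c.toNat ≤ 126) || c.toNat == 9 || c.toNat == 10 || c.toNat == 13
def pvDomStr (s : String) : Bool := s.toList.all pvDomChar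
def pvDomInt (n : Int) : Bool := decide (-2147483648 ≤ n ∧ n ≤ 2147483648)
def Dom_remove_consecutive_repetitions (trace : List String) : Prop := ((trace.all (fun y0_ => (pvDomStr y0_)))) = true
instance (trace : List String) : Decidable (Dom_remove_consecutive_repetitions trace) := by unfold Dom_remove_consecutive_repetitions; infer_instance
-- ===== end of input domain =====

-- B scans the list run by run and emits min(run_length, 2) copies per run, instead of A's
-- per-element three-way look-back; same cost, different decomposition (objective: alternative).


-- ===== PORT A =====
-- for i in range(2, n): append trace[i] unless trace[i] == trace[i-1] == trace[i-2]
def remove_consecutive_repetitions (trace : List String) : List String :=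
  let n : Int := trace.length
  if n < 3 then trace
  else
    (PySem.List.pyRange 2 n 1).foldl
      (fun result i =>
        if ¬ (PySem.List.pyGetD trace i "" = PySem.List.pyGetD trace (i-1) "" ∧
              PySem.List.pyGetD trace (i-1) "" = PySem.List.pyGetD trace (i-2) "")
        then result ++ [PySem.List.pyGetD trace i ""] else result)
      [PySem.List.pyGetD trace 0 "", PySem.List.pyGetD trace 1 ""]

-- ===== PORT B =====
-- inner while loop: split off the maximal run of elements equal to v (run length, rest)
def runSplit (v : String) : List String → Nat × List String
  | [] => (0, [])
  | x :: xs => if x = v then let p := runSplit v xs; (p.1 + 1, p.2) else (0, x :: xs)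

theorem runSplit_length_le (v : String) (l : List String) : (runSplit v l).2.length ≤ l.length := by
  induction l with
  | nil => simp [runSplit]
  | cons x xs ih =>
    simp only [runSplit]
    split
    · exact Nat.le_trans ih (Nat.le_succ _)
    · simp

-- outer while loop: emit min(run_length, 2) copies of each run's value
def groupEmit : List String → List String
  | [] => []
  | x :: xs =>
    let p := runSplit x xs
    List.replicate (min (p.1 + 1) 2) x ++ groupEmit p.2
termination_by l => l.length
decreasing_by
  exact Nat.lt_succ_of_le (runSplit_length_le x xs)

def remove_consecutive_repetitions_alt (trace : List String) : List String :=
  if trace.length < 3 then trace else groupEmit trace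

-- ===== PRECONDITION & SPEC =====
def Spec_remove_consecutive_repetitions (trace : List String) (out : List String) : Prop := out = remove_consecutive_repetitions_alt trace
instance (trace : List String) (out : List String) : Decidable (Spec_remove_consecutive_repetitions trace out) := by unfold Spec_remove_consecutive_repetitions; infer_instance

-- ===== CLAIM (what is proved, stated in full; the proofs are below) =====
def Claim_equal_remove_consecutive_repetitions : Prop := ∀ (trace : List String), Dom_remove_consecutive_repetitions trace → Spec_remove_consecutive_repetitions trace (remove_consecutive_repetitions trace)

-- ===== LEMMAS AND PROOFS =====

-- reference: look-back filter; lb p2 p1 l drops x when p2 = p1 = x, always shifting the window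
def lb (p2 p1 : String) : List String → List String
  | [] => []
  | x :: xs => (if x = p1 ∧ p1 = p2 then ([] : List String) else [x]) ++ lb p1 x xs

theorem lb_nil (p2 p1 : String) : lb p2 p1 [] = [] := rfl

theorem lb_cons (p2 p1 x : String) (xs : List String) :
    lb p2 p1 (x :: xs) = (if x = p1 ∧ p1 = p2 then ([] : List String) else [x]) ++ lb p1 x xs := rfl

-- A's loop over indices k..len equals the look-back filter on the suffix
theorem loopA_eq_lb (t : List String) (m : Nat) :
    ∀ (k : Nat) (acc : List String), 2 ≤ k → k + m = t.length →
    (PySem.List.pyRange (k : Int) (t.length : Int) 1).foldl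
      (fun result i =>
        if ¬ (PySem.List.pyGetD t i "" = PySem.List.pyGetD t (i-1) "" ∧
              PySem.List.pyGetD t (i-1) "" = PySem.List.pyGetD t (i-2) "")
        then result ++ [PySem.List.pyGetD t i ""] else result) acc
    = acc ++ lb (t.getD (k - 2) "") (t.getD (k - 1) "") (t.drop k) := by
  induction m with
  | zero =>
    intro k acc _ hk
    have h1 : PySem.List.pyRange (k : Int) (t.length : Int) 1 = [] := by
      apply PySem.List.pyRange_one_eq_nil; omega
    have h2 : t.drop k = [] := by
      apply List.drop_eq_nil_of_le; omega
    simp [h1, h2, lb_nil]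
  | succ m ih =>
    intro k acc hk2 hk
    have hlt : (k : Int) < (t.length : Int) := by omega
    rw [PySem.List.pyRange_one_cons hlt]
    simp only [List.foldl_cons]
    have hkk : (k : Int) + 1 = ((k + 1 : Nat) : Int) := by push_cast; ring
    have e0 : PySem.List.pyGetD t (k : Int) "" = t.getD k "" := by
      simp [PySem.List.pyGetD_natCast]
    have e1 : PySem.List.pyGetD t ((k : Int) - 1) "" = t.getD (k - 1) "" := by
      have : (k : Int) - 1 = ((k - 1 : Nat) : Int) := by omega
      rw [this]; simp [PySem.List.pyGetD_natCast]
    have e2 : PySem.List.pyGetD t ((k : Int) - 2) "" = t.getD (k - 2) "" := by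
      have : (k : Int) - 2 = ((k - 2 : Nat) : Int) := by omega
      rw [this]; simp [PySem.List.pyGetD_natCast]
    have hdrop : t.drop k = t.getD k "" :: t.drop (k + 1) := by
      have hklen : k < t.length := by omega
      rw [List.getD_eq_getElem _ _ hklen]
      rw [List.drop_eq_getElem_cons hklen]
    rw [hkk, ih (k + 1) _ (by omega) (by omega)]
    have hk1 : k + 1 - 2 = k - 1 := by omega
    have hk0 : k + 1 - 1 = k := by omega
    rw [hk1, hk0, hdrop, lb_cons]
    rw [e0, e1, e2]
    split_ifs <;> simp_all [List.append_assoc]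

-- mutual step lemmas: unfoldings of runSplit / groupEmit
theorem runSplit_cons_eq (v : String) (xs : List String) :
    runSplit v (v :: xs) = ((runSplit v xs).1 + 1, (runSplit v xs).2) := by
  simp [runSplit]

theorem runSplit_cons_ne (v x : String) (xs : List String) (h : x ≠ v) :
    runSplit v (x :: xs) = (0, x :: xs) := by
  simp [runSplit, h]

theorem groupEmit_cons (x : String) (xs : List String) :
    groupEmit (x :: xs)
      = List.replicate (min ((runSplit x xs).1 + 1) 2) x ++ groupEmit (runSplit x xs).2 := by
  rw [groupEmit]

theorem groupEmit_nil : groupEmit [] = [] := by rw [groupEmit]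

-- groupEmit after a broken run / after stripping a run, vs the look-back filter
theorem SR (n : Nat) : ∀ (l : List String), l.length ≤ n →
    ((∀ p2 p1, p2 ≠ p1 → groupEmit (p1 :: l) = p1 :: lb p2 p1 l) ∧
     (∀ a, groupEmit ((runSplit a l).2) = lb a a l)) := by
  induction n with
  | zero =>
    intro l hl
    have : l = [] := List.length_eq_zero_iff.mp (Nat.le_zero.mp hl)
    subst this
    refine ⟨fun p2 p1 _ => ?_, fun a => ?_⟩
    · simp [groupEmit_cons, runSplit, lb_nil, groupEmit_nil]
    · simp [runSplit, groupEmit_nil, lb_nil]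
  | succ n ih =>
    intro l hl
    have hxs : ∀ (x : String) (xs : List String), l = x :: xs → xs.length ≤ n := by
      intro x xs h; subst h; simpa using Nat.le_of_succ_le_succ hl
    refine ⟨fun p2 p1 hne => ?_, fun a => ?_⟩
    · cases l with
      | nil => simp [groupEmit_cons, runSplit, lb_nil, groupEmit_nil]
      | cons x xs =>
        by_cases hx : x = p1
        · subst hx
          rw [groupEmit_cons, runSplit_cons_eq]
          have hrep : min ((runSplit x xs).1 + 1 + 1) 2 = 2 := by omega
          rw [hrep, lb_cons, if_neg (by rintro ⟨_, h2⟩; exact hne h2.symm)]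
          rw [(ih xs (hxs x xs rfl)).2 x]
          simp
        · rw [groupEmit_cons, runSplit_cons_ne p1 x xs hx]
          rw [lb_cons, if_neg (by rintro ⟨h1, _⟩; exact hx h1)]
          have := (ih xs (hxs x xs rfl)).1 p1 x (fun h => hx h.symm)
          rw [this]
          simp
    · cases l with
      | nil => simp [runSplit, groupEmit_nil, lb_nil]
      | cons x xs =>
        by_cases hx : x = a
        · subst hx
          rw [runSplit_cons_eq]
          rw [(ih xs (hxs x xs rfl)).2 x, lb_cons, if_pos ⟨rfl, rfl⟩]
          simp
        · rw [runSplit_cons_ne a x xs hx]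
          rw [lb_cons, if_neg (by rintro ⟨h1, _⟩; exact hx h1)]
          have := (ih xs (hxs x xs rfl)).1 a x (fun h => hx h.symm)
          simpa using this

theorem groupEmit_eq_lb (a b : String) (l : List String) :
    groupEmit (a :: b :: l) = a :: b :: lb a b l := by
  by_cases hab : b = a
  · rw [hab, groupEmit_cons, runSplit_cons_eq]
    have hrep : min ((runSplit a l).1 + 1 + 1) 2 = 2 := by omega
    rw [hrep, (SR l.length l le_rfl).2 a]
    simp
  · rw [groupEmit_cons, runSplit_cons_ne a b l hab]
    show List.replicate (min (0 + 1) 2) a ++ groupEmit (b :: l) = a :: b :: lb a b l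
    rw [(SR l.length l le_rfl).1 a b (fun h => hab h.symm)]
    simp

-- ===== VERDICT (by name: the statement is the Claim_ definition above) =====
theorem remove_consecutive_repetitions_spec : Claim_equal_remove_consecutive_repetitions := by
  intro trace _
  unfold Spec_remove_consecutive_repetitions
  unfold remove_consecutive_repetitions remove_consecutive_repetitions_alt
  by_cases h3 : (trace.length : Int) < 3
  · simp only [h3, if_pos]
    rw [if_pos (by omega)]
  · rw [if_neg h3, if_neg (by omega)]
    match trace, (by omega : 3 ≤ trace.length) with
    | a :: b :: l, _ =>
      have hA := loopA_eq_lb (a :: b :: l) ((a :: b :: l).length - 2) 2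
        [PySem.List.pyGetD (a :: b :: l) 0 "", PySem.List.pyGetD (a :: b :: l) 1 ""]
        (le_refl 2) (by simp; omega)
      simp only [Nat.cast_ofNat] at hA
      rw [hA, groupEmit_eq_lb]
      simp [PySem.List.pyGetD]
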